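-- pv_equiv track=rewrite | github.com/schoukri/advent-of-code-2020 | 09/main.py | part_1
-- ===== SOURCE A (Python) =====
-- def part_1(nums, preamble):
--     for i in range(preamble, len(nums)):
--         found = False
--         for a in range(i - preamble, i):
--             for b in range(a + 1, i):
--                 if nums[a] + nums[b] == nums[i]:
--                     found = True
--                     break
--             if found:
--                 break
--         if not found:
--             return nums[i]
-- ===== SOURCE B (Python) =====
-- def part_1(nums, preamble):
--     for i in range(preamble, len(nums)):
--         target = nums[i]
--         seen = set()
--         found = False
--         for x in nums[i - preamble:i]:
--             if target - x in seen:
--                 found = True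
--                 break
--             seen.add(x)
--         if not found:
--             return nums[i]
-- ===== Notes on version B (the rewrite author's own statement) =====
-- stated objective: alternative
-- what changed: Each window is checked by a one-pass seen-set two-sum test (look up target-x before inserting x) instead of A's all-pairs double loop; intended as faster (measured 145-533x at mid sizes) but unconfirmed at the largest size, so claimed only as an alternative.
-- outside the precondition, e.g. on part_1([1, 2, 3], -1): A returns 3, B returns 1
import Mathlib
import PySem

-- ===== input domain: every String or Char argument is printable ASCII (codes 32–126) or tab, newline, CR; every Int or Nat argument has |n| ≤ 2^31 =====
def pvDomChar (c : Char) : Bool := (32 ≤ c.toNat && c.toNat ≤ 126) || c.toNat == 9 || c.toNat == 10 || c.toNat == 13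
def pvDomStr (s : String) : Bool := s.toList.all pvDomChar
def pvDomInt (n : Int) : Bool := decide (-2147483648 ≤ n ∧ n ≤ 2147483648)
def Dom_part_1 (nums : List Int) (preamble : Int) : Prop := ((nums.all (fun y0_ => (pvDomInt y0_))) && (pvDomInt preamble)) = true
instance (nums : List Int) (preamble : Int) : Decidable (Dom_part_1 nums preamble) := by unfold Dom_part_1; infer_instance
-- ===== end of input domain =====

-- B checks each window with a one-pass seen-set two-sum test instead of A's all-pairs double loop (objective: alternative).

-- ===== PORT A =====
-- found = any pair a < b in [i-preamble, i) with nums[a] + nums[b] == nums[i]  (the two inner loops with `break`)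
def part1FoundA (nums : List Int) (preamble i : Int) : Bool :=
  (PySem.List.pyRange (i - preamble) i 1).any (fun a =>
    (PySem.List.pyRange (a + 1) i 1).any (fun b =>
      PySem.List.pyGetD nums a 0 + PySem.List.pyGetD nums b 0 == PySem.List.pyGetD nums i 0))

-- the outer `for i in range(preamble, len(nums))` with its early `return nums[i]`
def part1LoopA (nums : List Int) (preamble : Int) : List Int → Option Int
  | [] => none
  | i :: rest =>
      if part1FoundA nums preamble i then part1LoopA nums preamble rest
      else some (PySem.List.pyGetD nums i 0)

def part_1 (nums : List Int) (preamble : Int) : Option Int :=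
  part1LoopA nums preamble (PySem.List.pyRange preamble nums.length 1)

-- ===== PORT B =====
-- `for x in window: if target - x in seen: found; break; seen.add(x)`
def part1Scan (t : Int) : List Int → PySem.Set Int → Bool
  | [], _ => false
  | x :: xs, seen =>
      if PySem.Set.contains seen (t - x) then true
      else part1Scan t xs (PySem.Set.add seen x)

def part1FoundB (nums : List Int) (preamble i : Int) : Bool :=
  part1Scan (PySem.List.pyGetD nums i 0)
    (PySem.List.slice nums (some (i - preamble)) (some i)) PySem.Set.empty

def part1LoopB (nums : List Int) (preamble : Int) : List Int → Option Int
  | [] => none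
  | i :: rest =>
      if part1FoundB nums preamble i then part1LoopB nums preamble rest
      else some (PySem.List.pyGetD nums i 0)

def part_1_alt (nums : List Int) (preamble : Int) : Option Int :=
  part1LoopB nums preamble (PySem.List.pyRange preamble nums.length 1)

-- ===== PRECONDITION & SPEC =====
-- Pre_ restricts to the task's natural domain of a non-negative window size: for negative preamble A
-- either raises IndexError or returns a value produced by Python's negative-index wraparound.
def Pre_part_1 (nums : List Int) (preamble : Int) : Prop := 0 ≤ preamble
instance (nums : List Int) (preamble : Int) : Decidable (Pre_part_1 nums preamble) := by unfold Pre_part_1; infer_instance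
def pvWitness_part_1 : List Int × Int := ([1, 2, 3, 5, 4, 9, 20], 3)
def Spec_part_1 (nums : List Int) (preamble : Int) (out : Option Int) : Prop := out = part_1_alt nums preamble
instance (nums : List Int) (preamble : Int) (out : Option Int) : Decidable (Spec_part_1 nums preamble out) := by unfold Spec_part_1; infer_instance

-- ===== CLAIM (what is proved, stated in full; the proofs are below) =====
def Claim_equal_part_1 : Prop := ∀ (nums : List Int) (preamble : Int), Dom_part_1 nums preamble → Pre_part_1 nums preamble → Spec_part_1 nums preamble (part_1 nums preamble)

-- ===== LEMMAS AND PROOFS =====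

-- "some pair x (earlier) + y (later) sums to t" — the shape both window checks reduce to
def part1PairSum (t : Int) : List Int → Bool
  | [] => false
  | x :: xs => xs.any (fun y => x + y == t) || part1PairSum t xs

lemma part1_any_or {α : Type} (p q : α → Bool) :
    ∀ l : List α, (l.any fun y => p y || q y) = (l.any p || l.any q) := by
  intro l
  induction l with
  | nil => simp
  | cons z zs ih => cases hp : p z <;> cases hq : q z <;> simp [List.any_cons, hp, hq, ih]

lemma part1_slice_cons (nums : List Int) (a b : Int) (h0 : 0 ≤ a) (hab : a < b)
    (hb : b ≤ nums.length) :
    PySem.List.slice nums (some a) (some b)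
      = PySem.List.pyGetD nums a 0 :: PySem.List.slice nums (some (a + 1)) (some b) := by
  have h0b : 0 ≤ b := by omega
  have ha : a.toNat < nums.length := by omega
  rw [PySem.List.slice_toNat nums h0 h0b, PySem.List.slice_toNat nums (by omega) h0b]
  rw [List.drop_eq_getElem_cons ha]
  have h2 : b.toNat - a.toNat = (b.toNat - (a + 1).toNat) + 1 := by omega
  have h3 : (a + 1).toNat = a.toNat + 1 := by omega
  rw [h2, List.take_succ_cons, h3, PySem.List.pyGetD_eq_getElem nums 0 h0 (by omega)]

lemma part1_range_any_eq_slice_any (nums : List Int) (i : Int) (f : Int → Bool) :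
    ∀ (n : Nat) (a : Int), (i - a).toNat = n → 0 ≤ a → 0 ≤ i → i ≤ nums.length →
    (PySem.List.pyRange a i 1).any (fun b => f (PySem.List.pyGetD nums b 0))
      = (PySem.List.slice nums (some a) (some i)).any f := by
  intro n
  induction n with
  | zero =>
    intro a ha h0 h0i hlen
    have hnil : PySem.List.pyRange a i = [] :=
      List.eq_nil_iff_forall_not_mem.mpr (fun x hx => by
        have := PySem.List.mem_pyRange_one.mp hx; omega)
    rw [hnil, PySem.List.slice_toNat nums h0 h0i]
    have : i.toNat - a.toNat = 0 := by omega
    rw [this]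
    simp
  | succ n ih =>
    intro a ha h0 h0i hlen
    have hai : a < i := by omega
    rw [PySem.List.pyRange_one_cons hai, List.any_cons]
    rw [part1_slice_cons nums a i h0 hai hlen, List.any_cons]
    rw [ih (a + 1) (by omega) (by omega) h0i hlen]

lemma part1_foundA_eq_pairSum (nums : List Int) (i : Int) :
    ∀ (n : Nat) (lo : Int), (i - lo).toNat = n → 0 ≤ lo → 0 ≤ i → i ≤ nums.length →
    (PySem.List.pyRange lo i 1).any (fun a =>
      (PySem.List.pyRange (a + 1) i 1).any (fun b =>
        PySem.List.pyGetD nums a 0 + PySem.List.pyGetD nums b 0 == PySem.List.pyGetD nums i 0))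
      = part1PairSum (PySem.List.pyGetD nums i 0) (PySem.List.slice nums (some lo) (some i)) := by
  intro n
  induction n with
  | zero =>
    intro lo hn h0 h0i hlen
    have hnil : PySem.List.pyRange lo i = [] :=
      List.eq_nil_iff_forall_not_mem.mpr (fun x hx => by
        have := PySem.List.mem_pyRange_one.mp hx; omega)
    rw [hnil, PySem.List.slice_toNat nums h0 h0i]
    have : i.toNat - lo.toNat = 0 := by omega
    rw [this]
    simp [part1PairSum]
  | succ n ih =>
    intro lo hn h0 h0i hlen
    have hli : lo < i := by omega
    rw [PySem.List.pyRange_one_cons hli, List.any_cons]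
    rw [part1_range_any_eq_slice_any nums i
      (fun y => PySem.List.pyGetD nums lo 0 + y == PySem.List.pyGetD nums i 0)
      ((i - (lo + 1)).toNat) (lo + 1) rfl (by omega) h0i hlen]
    rw [ih (lo + 1) (by omega) (by omega) h0i hlen]
    rw [part1_slice_cons nums lo i h0 hli hlen]
    rfl

lemma part1_contains_add (seen : PySem.Set Int) (x z : Int) :
    PySem.Set.contains (PySem.Set.add seen x) z
      = (PySem.Set.contains seen z || z == x) := by
  by_cases h2 : z = x
  · subst h2
    by_cases h1 : z ∈ seen <;> simp [h1]
  · by_cases h1 : z ∈ seen <;> simp [PySem.Set.mem_add, h1, h2]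

lemma part1_scan_char (t : Int) :
    ∀ (l : List Int) (seen : PySem.Set Int),
    part1Scan t l seen
      = (l.any (fun x => PySem.Set.contains seen (t - x)) || part1PairSum t l) := by
  intro l
  induction l with
  | nil => intro seen; simp [part1Scan, part1PairSum]
  | cons x xs ih =>
    intro seen
    rw [part1Scan]
    by_cases h : PySem.Set.contains seen (t - x) = true
    · rw [if_pos h, List.any_cons, h]
      simp
    · have hx : PySem.Set.contains seen (t - x) = false := by
        cases hc : PySem.Set.contains seen (t - x)
        · rfl
        · exact absurd hc h
      rw [if_neg h, ih, List.any_cons, hx, Bool.false_or]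
      simp only [part1PairSum]
      have key : ∀ y : Int, ((x + y == t) = (t - y == x)) := by
        intro y
        by_cases hxy : x + y = t
        · have : t - y = x := by omega
          simp [hxy, this]
        · have : t - y ≠ x := by omega
          simp [hxy, this]
      have congr1 : (xs.any fun y => PySem.Set.contains (PySem.Set.add seen x) (t - y))
          = (xs.any fun y => PySem.Set.contains seen (t - y) || (t - y == x)) :=
        PySem.List.any_congr_mem (fun y _ => part1_contains_add seen x (t - y))
      rw [congr1, part1_any_or]
      have congr2 : (xs.any fun y => x + y == t) = (xs.any fun y => t - y == x) :=
        PySem.List.any_congr_mem (fun y _ => key y)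
      rw [congr2, Bool.or_assoc]

lemma part1_found_eq (nums : List Int) (preamble i : Int) (hp : 0 ≤ preamble)
    (hi : preamble ≤ i) (hlen : i ≤ nums.length) :
    part1FoundA nums preamble i = part1FoundB nums preamble i := by
  unfold part1FoundA part1FoundB
  rw [part1_scan_char]
  rw [part1_foundA_eq_pairSum nums i ((i - (i - preamble)).toNat) (i - preamble) rfl
    (by omega) (by omega) hlen]
  simp [PySem.Set.empty]

lemma part1_loop_eq (nums : List Int) (preamble : Int) :
    ∀ (l : List Int), (∀ i ∈ l, part1FoundA nums preamble i = part1FoundB nums preamble i) →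
    part1LoopA nums preamble l = part1LoopB nums preamble l := by
  intro l
  induction l with
  | nil => intro _; rfl
  | cons i rest ih =>
    intro h
    simp only [part1LoopA, part1LoopB]
    rw [h i (by simp)]
    by_cases hf : part1FoundB nums preamble i = true
    · rw [if_pos hf, if_pos hf]
      exact ih (fun j hj => h j (by simp [hj]))
    · rw [if_neg hf, if_neg hf]

-- ===== VERDICT (by name: the statement is the Claim_ definition above) =====
theorem part_1_spec : Claim_equal_part_1 := by
  intro nums preamble _ hpre
  unfold Spec_part_1 part_1 part_1_alt
  apply part1_loop_eq
  intro i hi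
  have hm := PySem.List.mem_pyRange_one.mp hi
  exact part1_found_eq nums preamble i hpre hm.1 (by omega)
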